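-- pv_equiv track=rewrite | github.com/dodoyeon/SW_Academy | DP/5705_hex.py | hex2
-- ===== SOURCE A (Python) =====
-- def hex2(n):
--     if n < 3:
--         return n
--     colen = ((n + 1) // 2 + (n + 1) % 2)
--     d = [[0] * colen for _ in range(2)]
--     d[0][0], d[1][1] = 1, 2
--     mok, nam = n // 2, n % 2
--     for i in range(colen):
--         for j in range(1, -1, -1):
--             if (i == 1 and j == 1) or (i == 0 and j == 0) or (i == 0 and j == 1):
--                 pass
--             elif j == 1:
--                 d[j][i] = d[j-1][i-1]+d[j][i-1]
--             else:
--                 d[j][i] = d[j+1][i] + d[j][i-1]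
--     if nam == 0:
--         return d[1][mok]
--     else:
--         return d[0][mok]
-- ===== SOURCE B (Python) =====
-- def hex2(n):
--     if n < 3:
--         return n
--     # fast-doubling Fibonacci: fd(k) = (F(k), F(k+1))
--     def fd(k):
--         if k == 0:
--             return (0, 1)
--         a, b = fd(k >> 1)
--         c = a * (2 * b - a)
--         d = a * a + b * b
--         if k & 1:
--             return (d, c + d)
--         return (c, d)
--     return fd(n + 1)[0]
-- ===== Notes on version B (the rewrite author's own statement) =====
-- stated objective: faster
-- what changed: A fills an O(n)-size two-row DP table; B recognises the answer as the Fibonacci number F(n+1) and computes it by fast doubling in O(log n) multiplications.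
import Mathlib
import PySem

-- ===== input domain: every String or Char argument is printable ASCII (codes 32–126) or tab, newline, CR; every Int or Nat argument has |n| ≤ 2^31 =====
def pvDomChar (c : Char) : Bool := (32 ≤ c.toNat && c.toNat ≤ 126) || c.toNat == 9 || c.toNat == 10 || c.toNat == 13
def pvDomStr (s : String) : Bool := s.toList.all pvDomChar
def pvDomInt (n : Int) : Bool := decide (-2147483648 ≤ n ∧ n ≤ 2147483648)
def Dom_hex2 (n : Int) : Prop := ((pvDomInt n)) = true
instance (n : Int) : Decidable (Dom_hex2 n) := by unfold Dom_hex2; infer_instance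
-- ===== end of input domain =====

-- B replaces A's O(n)-size two-row DP table by fast-doubling Fibonacci (the answer is F(n+1)); return values only, no side effects.

-- ===== PORT A =====
-- body of the inner 'for j in range(1, -1, -1)' loop; every pyGetD/pySetD index reached is in range
def hexJ (i : Int) (st : List Int × List Int) (j : Int) : List Int × List Int :=
  if (i = 1 ∧ j = 1) ∨ (i = 0 ∧ j = 0) ∨ (i = 0 ∧ j = 1) then st
  else if j = 1 then
    (st.1, PySem.List.pySetD st.2 i (PySem.List.pyGetD st.1 (i-1) 0 + PySem.List.pyGetD st.2 (i-1) 0))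
  else
    (PySem.List.pySetD st.1 i (PySem.List.pyGetD st.2 i 0 + PySem.List.pyGetD st.1 (i-1) 0), st.2)

def hex2 (n : Int) : Int :=
  if n < 3 then n
  else
    let colen := PySem.Int.floordiv (n+1) 2 + PySem.Int.mod (n+1) 2
    -- d = [[0]*colen for _ in range(2)]; d[0][0], d[1][1] = 1, 2
    let d0 := PySem.List.pySetD (List.replicate colen.toNat (0:Int)) 0 1
    let d1 := PySem.List.pySetD (List.replicate colen.toNat (0:Int)) 1 2
    let mok := PySem.Int.floordiv n 2
    let nam := PySem.Int.mod n 2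
    let st := (PySem.List.pyRange 0 colen 1).foldl
      (fun st i => (PySem.List.pyRange 1 (-1) (-1)).foldl (hexJ i) st) (d0, d1)
    if nam = 0 then PySem.List.pyGetD st.2 mok 0 else PySem.List.pyGetD st.1 mok 0

-- ===== PORT B =====
-- fd k = (F k, F (k+1)) by fast doubling (Source B's inner fd)
def fastDouble (k : Nat) : Int × Int :=
  if _h : k = 0 then (0, 1)
  else
    let p := fastDouble (k / 2)
    let a := p.1
    let b := p.2
    let c := a * (2 * b - a)
    let d := a * a + b * b
    if k % 2 = 1 then (d, c + d) else (c, d)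
decreasing_by exact Nat.div_lt_self (Nat.pos_of_ne_zero _h) (by omega)

def hex2_alt (n : Int) : Int :=
  if n < 3 then n else (fastDouble (n + 1).toNat).1

-- ===== PRECONDITION & SPEC =====
def Spec_hex2 (n : Int) (out : Int) : Prop := out = hex2_alt n
instance (n : Int) (out : Int) : Decidable (Spec_hex2 n out) := by unfold Spec_hex2; infer_instance

-- ===== CLAIM (what is proved, stated in full; the proofs are below) =====
def Claim_equal_hex2 : Prop := ∀ (n : Int), Dom_hex2 n → Spec_hex2 n (hex2 n)

-- ===== LEMMAS AND PROOFS =====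

theorem fastDouble_eq (k : Nat) : fastDouble k = ((Nat.fib k : Int), (Nat.fib (k+1) : Int)) := by
  induction k using Nat.strong_induction_on with
  | _ k ih =>
    rw [fastDouble]
    by_cases h0 : k = 0
    · simp [h0]
    · have ihh := ih (k / 2) (Nat.div_lt_self (Nat.pos_of_ne_zero h0) (by omega))
      simp only [h0, dif_neg, ihh, not_false_iff]
      set m := k / 2 with hm
      have hle : Nat.fib m ≤ 2 * Nat.fib (m + 1) :=
        le_trans Nat.fib_le_fib_succ (by omega)
      have hc : (Nat.fib m : Int) * (2 * (Nat.fib (m+1) : Int) - (Nat.fib m : Int))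
          = (Nat.fib (2*m) : Int) := by
        rw [Nat.fib_two_mul]; push_cast [hle]; ring
      have hd : (Nat.fib m : Int) * (Nat.fib m : Int) + (Nat.fib (m+1) : Int) * (Nat.fib (m+1) : Int)
          = (Nat.fib (2*m+1) : Int) := by
        rw [Nat.fib_two_mul_add_one]; push_cast; ring
      by_cases hpar : k % 2 = 1
      · have hk : k = 2*m + 1 := by omega
        simp only [hpar, if_pos]
        rw [hc, hd, hk]
        have : Nat.fib (2*m+1+1) = Nat.fib (2*m) + Nat.fib (2*m+1) := Nat.fib_add_two
        rw [this]; push_cast; ring_nf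
      · have hk : k = 2*m := by omega
        simp only [hpar, if_neg, not_false_iff]
        rw [hc, hd, hk]

-- the inner j-loop for i = 0 does nothing
theorem inner_id (st : List Int × List Int) :
    (PySem.List.pyRange 1 (-1) (-1)).foldl (hexJ 0) st = st := by
  show hexJ 0 (hexJ 0 st 1) 0 = st
  simp [hexJ]

-- for i = 1 only the j = 0 branch fires
theorem inner_one (st : List Int × List Int) :
    (PySem.List.pyRange 1 (-1) (-1)).foldl (hexJ 1) st
    = (st.1.set 1 (st.2[1]?.getD 0 + st.1[0]?.getD 0), st.2) := by
  show hexJ 1 (hexJ 1 st 1) 0 = _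
  simp [hexJ, PySem.List.pySetD_of_nonneg, PySem.List.pyGetD_ofNat', List.getD_eq_getElem?_getD]

-- for i ≥ 2 both branches fire, j = 0 reading the value j = 1 just wrote
theorem inner_step (K : Nat) (hK : 2 ≤ K) (d0 d1 : List Int) (h1 : K < d1.length) :
    (PySem.List.pyRange 1 (-1) (-1)).foldl (hexJ (K : Int)) (d0, d1)
    = (d0.set K (d0[K-1]?.getD 0 + d1[K-1]?.getD 0 + d0[K-1]?.getD 0),
       d1.set K (d0[K-1]?.getD 0 + d1[K-1]?.getD 0)) := by
  show hexJ _ (hexJ _ (d0, d1) 1) 0 = _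
  have h0 : ¬ ((K:Int) = 1) := by omega
  have hK0 : ¬ (K = 0) := by omega
  have hc : (K:Int) - 1 = ((K-1 : Nat) : Int) := by omega
  simp [hexJ, h0, hc, hK0, h1]

-- A's table after the first K columns: row 0 holds F(2t+2), row 1 holds F(2t+1)
def HexInv (m K : Nat) (st : List Int × List Int) : Prop :=
  st.1.length = m ∧ st.2.length = m ∧
  (∀ t : Nat, t < K → st.1[t]?.getD 0 = (Nat.fib (2*t+2) : Int)) ∧
  (∀ t : Nat, 1 ≤ t → t < K → st.2[t]?.getD 0 = (Nat.fib (2*t+1) : Int))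

theorem hexLoop_inv (m K : Nat) (h2 : 2 ≤ K) (hK : K ≤ m) :
    HexInv m K ((PySem.List.pyRange 0 (K : Int) 1).foldl
      (fun st i => (PySem.List.pyRange 1 (-1) (-1)).foldl (hexJ i) st)
      (PySem.List.pySetD (List.replicate m (0:Int)) 0 1,
       PySem.List.pySetD (List.replicate m (0:Int)) 1 2)) := by
  induction K with
  | zero => omega
  | succ K ih =>
    by_cases hK2 : 2 ≤ K
    · -- step case: peel off column K
      have hsplit : PySem.List.pyRange 0 ((K:Int)+1) 1
          = PySem.List.pyRange 0 (K:Int) 1 ++ [(K:Int)] :=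
        PySem.List.pyRange_one_succ_right (by omega)
      have hcast : ((K+1 : Nat) : Int) = (K:Int) + 1 := by omega
      rw [hcast, hsplit, List.foldl_append]
      obtain ⟨hl0, hl1, hr0, hr1⟩ := ih hK2 (by omega)
      set st := (PySem.List.pyRange 0 (K:Int) 1).foldl
        (fun st i => (PySem.List.pyRange 1 (-1) (-1)).foldl (hexJ i) st)
        (PySem.List.pySetD (List.replicate m (0:Int)) 0 1,
         PySem.List.pySetD (List.replicate m (0:Int)) 1 2) with hst
      simp only [List.foldl_cons, List.foldl_nil]
      rw [show st = (st.1, st.2) from rfl, inner_step K hK2 st.1 st.2 (by omega)]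
      have e0 : st.1[K-1]?.getD 0 = (Nat.fib (2*K) : Int) := by
        rw [hr0 (K-1) (by omega), show 2*(K-1)+2 = 2*K from by omega]
      have e1 : st.2[K-1]?.getD 0 = (Nat.fib (2*K-1) : Int) := by
        rw [hr1 (K-1) (by omega) (by omega), show 2*(K-1)+1 = 2*K-1 from by omega]
      have hfib1 : (Nat.fib (2*K) : Int) + (Nat.fib (2*K-1) : Int) = (Nat.fib (2*K+1) : Int) := by
        have : Nat.fib (2*K-1+2) = Nat.fib (2*K-1) + Nat.fib (2*K-1+1) := Nat.fib_add_two
        have h1 : 2*K-1+2 = 2*K+1 := by omega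
        have h2' : 2*K-1+1 = 2*K := by omega
        rw [h1, h2'] at this
        push_cast [this]; ring
      have hfib0 : (Nat.fib (2*K+1) : Int) + (Nat.fib (2*K) : Int) = (Nat.fib (2*K+2) : Int) := by
        have : Nat.fib (2*K+2) = Nat.fib (2*K) + Nat.fib (2*K+1) := Nat.fib_add_two
        push_cast [this]; ring
      refine ⟨by simpa using hl0, by simpa using hl1, ?_, ?_⟩
      · intro t ht
        by_cases htK : t = K
        · subst htK
          rw [List.getElem?_set_self (by omega : t < st.1.length)]
          simp only [Option.getD_some]
          rw [e0, e1]
          linarith [hfib0, hfib1]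
        · rw [List.getElem?_set_ne (by omega)]
          exact hr0 t (by omega)
      · intro t ht1 ht
        by_cases htK : t = K
        · subst htK
          rw [List.getElem?_set_self (by omega : t < st.2.length)]
          simp only [Option.getD_some]
          rw [e0, e1]
          exact hfib1
        · rw [List.getElem?_set_ne (by omega)]
          exact hr1 t ht1 (by omega)
    · -- base case K + 1 = 2
      have hKeq : K = 1 := by omega
      subst hKeq
      have h2m : 2 ≤ m := hK
      have hr01 : PySem.List.pyRange 0 ((2:Nat):Int) 1 = [0, 1] := by decide
      rw [hr01]
      simp only [List.foldl_cons, List.foldl_nil]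
      rw [inner_id, inner_one]
      simp only [PySem.List.pySetD_of_nonneg _ _ (show (0:Int) ≤ 0 by norm_num),
        PySem.List.pySetD_of_nonneg _ _ (show (0:Int) ≤ 1 by norm_num),
        Int.toNat_zero, Int.toNat_one]
      have hv1 : ((List.replicate m (0:Int)).set 1 2)[1]?.getD 0 = 2 := by
        rw [List.getElem?_set_self (by simpa using h2m)]; rfl
      have hv0 : ((List.replicate m (0:Int)).set 0 1)[0]?.getD 0 = 1 := by
        rw [List.getElem?_set_self (by simpa using (by omega : 0 < m))]; rfl
      refine ⟨by simp, by simp, ?_, ?_⟩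
      · intro t ht
        simp only [hv1, hv0]
        interval_cases t
        · rw [List.getElem?_set_ne (by omega), List.getElem?_set_self (by simpa using (by omega : 0 < m))]
          decide
        · rw [List.getElem?_set_self (by simpa using h2m)]
          decide
      · intro t ht1 ht
        interval_cases t
        rw [hv1]; decide

theorem hex2_eq_fib (n : Int) (h : 3 ≤ n) : hex2 n = (Nat.fib (n+1).toNat : Int) := by
  have hn3 : ¬ n < 3 := by omega
  obtain ⟨N, rfl⟩ : ∃ N : Nat, n = (N : Int) := ⟨n.toNat, by omega⟩
  have hN : 3 ≤ N := by exact_mod_cast h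
  set m := N / 2 + 1 with hm
  have hcolen : PySem.Int.floordiv ((N:Int)+1) 2 + PySem.Int.mod ((N:Int)+1) 2 = (m : Int) := by
    rw [PySem.Int.floordiv_eq_ediv_of_pos (by omega), PySem.Int.mod_eq_emod_of_pos (by omega)]
    omega
  have hmok : PySem.Int.floordiv (N:Int) 2 = ((N/2 : Nat) : Int) := by
    rw [PySem.Int.floordiv_eq_ediv_of_pos (by omega)]; omega
  have hnam : PySem.Int.mod (N:Int) 2 = ((N % 2 : Nat) : Int) := by
    rw [PySem.Int.mod_eq_emod_of_pos (by omega)]; omega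
  rw [hex2]
  simp only [hn3, if_neg, not_false_iff, hcolen, hmok, hnam, Int.toNat_natCast]
  have hinv := hexLoop_inv m m (by omega) (le_refl m)
  obtain ⟨hl0, hl1, hr0, hr1⟩ := hinv
  have htn : ((N:Int) + 1).toNat = N + 1 := by omega
  by_cases hpar : N % 2 = 0
  · have : ((N % 2 : Nat) : Int) = 0 := by exact_mod_cast hpar
    rw [if_pos this, PySem.List.pyGetD_natCast, List.getD_eq_getElem?_getD]
    rw [hr1 (N/2) (by omega) (by omega), htn, show 2*(N/2)+1 = N+1 from by omega]
  · have : ¬ ((N % 2 : Nat) : Int) = 0 := by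
      intro hc; exact hpar (by exact_mod_cast hc)
    rw [if_neg this, PySem.List.pyGetD_natCast, List.getD_eq_getElem?_getD]
    rw [hr0 (N/2) (by omega), htn, show 2*(N/2)+2 = N+1 from by omega]

theorem hex2_alt_eq_fib (n : Int) (h : 3 ≤ n) : hex2_alt n = (Nat.fib (n+1).toNat : Int) := by
  have : ¬ n < 3 := by omega
  simp [hex2_alt, this, fastDouble_eq]

-- ===== VERDICT (by name: the statement is the Claim_ definition above) =====
theorem hex2_spec : Claim_equal_hex2 := by
  intro n _
  unfold Spec_hex2
  by_cases h : n < 3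
  · simp [hex2, hex2_alt, h]
  · rw [hex2_eq_fib n (by omega), hex2_alt_eq_fib n (by omega)]
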